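-- pv_equiv track=rewrite | github.com/SuperInstance/forgemaster | flux-hardware/hdc/flux_hdc.py | pack_to_uint64
-- ===== SOURCE A (Python) =====
-- def pack_to_uint64(vector):
--     result = []
--     for i in range(0, len(vector), 64):
--         chunk = vector[i:i+64]
--         while len(chunk) < 64:
--             chunk.append(0)
--         val = 0
--         for bit in chunk:
--             val = (val << 1) | bit
--         result.append(val)
--     return result
-- ===== SOURCE B (Python) =====
-- def pack_to_uint64(vector):
--     # one streaming pass: accumulate bits into val, flush every 64 bits,
--     # left-shift the trailing partial word to reproduce zero padding
--     result = []
--     val = 0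
--     cnt = 0
--     for bit in vector:
--         val = (val << 1) | bit
--         cnt += 1
--         if cnt == 64:
--             result.append(val)
--             val = 0
--             cnt = 0
--     if cnt:
--         result.append(val << (64 - cnt))
--     return result
-- ===== Notes on version B (the rewrite author's own statement) =====
-- stated objective: simpler
-- what changed: Replaces the chunk-slicing outer loop with inner padding/folding loops by a single streaming pass that maintains an accumulator and a bit counter, flushing every 64 bits and shifting the final partial word.
import Mathlib
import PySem

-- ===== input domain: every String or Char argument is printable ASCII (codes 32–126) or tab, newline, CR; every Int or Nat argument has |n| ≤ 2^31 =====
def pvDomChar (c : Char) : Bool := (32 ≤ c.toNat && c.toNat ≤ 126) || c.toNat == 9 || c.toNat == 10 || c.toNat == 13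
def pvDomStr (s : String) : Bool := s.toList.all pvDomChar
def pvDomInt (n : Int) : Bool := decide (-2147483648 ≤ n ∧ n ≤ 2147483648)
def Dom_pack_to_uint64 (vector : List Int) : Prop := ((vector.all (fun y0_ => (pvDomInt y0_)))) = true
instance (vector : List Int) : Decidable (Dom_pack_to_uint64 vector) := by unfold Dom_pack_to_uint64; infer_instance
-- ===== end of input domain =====

-- B replaces A's chunk-slicing loop (with inner padding and fold loops) by one
-- streaming pass with an accumulator and bit counter; same cost, simpler shape.


-- ===== PORT A =====
-- the `while len(chunk) < 64: chunk.append(0)` loop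
def padChunk (chunk : List Int) : List Int :=
  if chunk.length < 64 then padChunk (chunk ++ [0]) else chunk
termination_by 64 - chunk.length
decreasing_by simp; omega

def pack_to_uint64 (vector : List Int) : List Int :=
  (PySem.List.pyRange 0 (vector.length) 64).foldl (fun result i =>
    let chunk := PySem.List.slice vector (some i) (some (i + 64))
    let chunk := padChunk chunk
    let val := chunk.foldl (fun val bit => PySem.Int.bor (val <<< (1 : Nat)) bit) 0
    result ++ [val]) []

-- ===== PORT B =====
def pack_to_uint64_alt (vector : List Int) : List Int :=
  let s := vector.foldl (fun (s : List Int × Int × Nat) bit =>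
    let val := PySem.Int.bor (s.2.1 <<< (1 : Nat)) bit
    let cnt := s.2.2 + 1
    if cnt = 64 then (s.1 ++ [val], 0, 0) else (s.1, val, cnt)) ([], 0, 0)
  if s.2.2 ≠ 0 then s.1 ++ [s.2.1 <<< (64 - s.2.2)] else s.1

-- ===== PRECONDITION & SPEC =====
def Spec_pack_to_uint64 (vector : List Int) (out : List Int) : Prop := out = pack_to_uint64_alt vector
instance (vector : List Int) (out : List Int) : Decidable (Spec_pack_to_uint64 vector out) := by unfold Spec_pack_to_uint64; infer_instance

-- ===== CLAIM (what is proved, stated in full; the proofs are below) =====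
def Claim_equal_pack_to_uint64 : Prop := ∀ (vector : List Int), Dom_pack_to_uint64 vector → Spec_pack_to_uint64 vector (pack_to_uint64 vector)

-- ===== LEMMAS AND PROOFS =====

/-- Shared fold: feed bits into an accumulator by `(val << 1) | bit`. -/
def foldB (p : List Int) (v : Int) : Int :=
  p.foldl (fun val bit => PySem.Int.bor (val <<< (1 : Nat)) bit) v

/-- Reference: pack 64-bit chunks, zero-padding the last one. -/
def packRec (v : List Int) : List Int :=
  if v = [] then [] else foldB (padChunk (v.take 64)) 0 :: packRec (v.drop 64)
termination_by v.length
decreasing_by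
  simp [List.length_drop]
  have : v.length ≠ 0 := by simpa [List.length_eq_zero_iff] using ‹v ≠ []›
  omega

lemma packRec_nil : packRec [] = [] := by rw [packRec]; simp

lemma padChunk_eq_aux : ∀ (n : Nat) (c : List Int), 64 - c.length = n →
    padChunk c = c ++ List.replicate n 0 := by
  intro n
  induction n with
  | zero =>
    intro c h
    unfold padChunk
    rw [if_neg (by omega)]
    simp
  | succ n ih =>
    intro c h
    unfold padChunk
    rw [if_pos (by omega)]
    rw [ih (c ++ [0]) (by simp; omega)]
    simp [List.replicate_succ]

lemma padChunk_eq (c : List Int) : padChunk c = c ++ List.replicate (64 - c.length) 0 :=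
  padChunk_eq_aux _ c rfl

lemma foldB_replicate (k : Nat) (v : Int) : foldB (List.replicate k 0) v = v <<< k := by
  induction k generalizing v with
  | zero => simp [foldB, Int.shiftLeft_eq]
  | succ k ih =>
    rw [List.replicate_succ]
    show foldB (List.replicate k 0) (PySem.Int.bor (v <<< (1 : Nat)) 0) = _
    rw [PySem.Int.bor_zero, ih]
    simp [Int.shiftLeft_eq, pow_succ]
    ring

lemma foldB_append (p q : List Int) (v : Int) : foldB (p ++ q) v = foldB q (foldB p v) :=
  List.foldl_append

lemma pyRange64_nil (a b : Int) (h : b ≤ a) : PySem.List.pyRange a b 64 = [] := by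
  rw [PySem.List.pyRange_of_pos a b (by norm_num)]
  rw [if_neg (by omega)]
  simp

lemma pyRange64_cons (a b : Int) (h : a < b) :
    PySem.List.pyRange a b 64 = a :: PySem.List.pyRange (a + 64) b 64 := by
  rw [PySem.List.pyRange_of_pos a b (by norm_num),
      PySem.List.pyRange_of_pos (a + 64) b (by norm_num)]
  have hc : (if a < b then ((b - a + 64 - 1) / 64).toNat else 0)
      = (if a + 64 < b then ((b - (a + 64) + 64 - 1) / 64).toNat else 0) + 1 := by
    split_ifs <;> omega
  rw [hc, List.range_succ_eq_map]
  simp [List.map_map, Function.comp]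
  intro k _
  ring

/-- A's loop, from index `j` on, appends exactly the packed chunks of `vector.drop j`. -/
lemma A_loop (vector : List Int) : ∀ (fuel j : Nat) (res : List Int),
    vector.length ≤ j + fuel →
    (PySem.List.pyRange (j : Int) (vector.length) 64).foldl (fun result i =>
      result ++ [(padChunk (PySem.List.slice vector (some i) (some (i + 64)))).foldl
        (fun val bit => PySem.Int.bor (val <<< (1 : Nat)) bit) 0]) res
      = res ++ packRec (vector.drop j) := by
  intro fuel
  induction fuel with
  | zero =>
    intro j res h
    rw [pyRange64_nil _ _ (by exact_mod_cast (by omega : vector.length ≤ j))]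
    rw [List.drop_eq_nil_of_le (by omega)]
    rw [packRec]
    simp
  | succ fuel ih =>
    intro j res h
    by_cases hj : vector.length ≤ j
    · rw [pyRange64_nil _ _ (by exact_mod_cast hj)]
      rw [List.drop_eq_nil_of_le hj]
      rw [packRec]
      simp
    · rw [pyRange64_cons _ _ (by exact_mod_cast (show j < vector.length by omega))]
      rw [List.foldl_cons]
      have hslice : PySem.List.slice vector (some (j : Int)) (some ((j : Int) + 64))
          = (vector.drop j).take 64 := by
        have := PySem.List.slice_natCast_add vector j 64
        simpa using this
      have hj64 : ((j : Int) + 64) = ((j + 64 : Nat) : Int) := by push_cast; ring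
      rw [hslice, hj64, ih (j + 64) _ (by omega)]
      conv_rhs => rw [packRec]
      rw [if_neg (by simp [List.drop_eq_nil_iff]; omega), List.drop_drop]
      simp [foldB]

/-- B's streaming loop with pending partial chunk `p` equals the chunked reference. -/
lemma B_loop : ∀ (v p res : List Int), p.length < 64 →
    (let s := v.foldl (fun (s : List Int × Int × Nat) bit =>
        let val := PySem.Int.bor (s.2.1 <<< (1 : Nat)) bit
        let cnt := s.2.2 + 1
        if cnt = 64 then (s.1 ++ [val], 0, 0) else (s.1, val, cnt)) (res, foldB p 0, p.length)
      if s.2.2 ≠ 0 then s.1 ++ [s.2.1 <<< (64 - s.2.2)] else s.1)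
      = res ++ packRec (p ++ v) := by
  intro v
  induction v with
  | nil =>
    intro p res hp
    simp only [List.foldl_nil, List.append_nil]
    by_cases hp0 : p = []
    · subst hp0
      rw [packRec]
      simp
    · have hlen : p.length ≠ 0 := by simpa [List.length_eq_zero_iff] using hp0
      rw [if_pos hlen]
      rw [packRec, if_neg hp0]
      rw [List.take_of_length_le (by omega), List.drop_eq_nil_of_le (by omega)]
      rw [packRec_nil]
      rw [padChunk_eq, foldB_append, foldB_replicate]
  | cons b t ih =>
    intro p res hp
    simp only [List.foldl_cons]
    have hval : PySem.Int.bor (foldB p 0 <<< (1 : Nat)) b = foldB (p ++ [b]) 0 := by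
      rw [foldB_append]; rfl
    by_cases h64 : p.length + 1 = 64
    · simp only [hval, h64, if_true]
      have h2 := ih [] (res ++ [foldB (p ++ [b]) 0]) (by simp)
      simp only [foldB, List.foldl_nil, List.length_nil, List.nil_append] at h2 ⊢
      rw [h2]
      have hsplit : p ++ b :: t = (p ++ [b]) ++ t := by simp
      rw [hsplit]
      conv_rhs => rw [packRec]
      rw [if_neg (by simp)]
      have hlen : (p ++ [b]).length = 64 := by simp; omega
      rw [List.take_append_of_le_length (by omega), List.take_of_length_le (by omega),
          List.drop_append_of_le_length (by omega), List.drop_eq_nil_of_le (by omega)]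
      simp only [List.nil_append]
      have hpad : padChunk (p ++ [b]) = p ++ [b] := by
        unfold padChunk
        rw [if_neg (by omega)]
      rw [hpad]
      simp
      simp [foldB]
    · simp only [hval, if_neg (by omega : ¬ (p.length + 1 = 64))]
      have hlb : (p ++ [b]).length = p.length + 1 := by simp
      have := ih (p ++ [b]) res (by omega)
      rw [hlb] at this
      rw [this]
      simp

-- ===== VERDICT (by name: the statement is the Claim_ definition above) =====
theorem pack_to_uint64_spec : Claim_equal_pack_to_uint64 := by
  intro vector _
  unfold Spec_pack_to_uint64 pack_to_uint64 pack_to_uint64_alt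
  have hA := A_loop vector vector.length 0 [] (by omega)
  have hB := B_loop vector [] [] (by simp)
  simp only [List.drop_zero, List.nil_append] at hA hB
  rw [Nat.cast_zero] at hA
  rw [hA]
  rw [← hB]
  rfl
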